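-- pv_equiv track=rewrite | github.com/marcus-grant/advent-of-code | 2023/07/solve.py | count_cards_wild
-- ===== SOURCE A (Python) =====
-- from typing import Any, Optional, List, Tuple, Dict, Union
--
-- def count_cards_wild(hand: str) -> Tuple[list[int], int]:
--     wilds = 0
--     counts = {} # First count using a dict
--     for c in hand:
--         if c == 'J': wilds += 1
--         else: counts[c] = counts.get(c, 0) + 1
--     if len(counts) == 0: return [0], wilds
--     return sorted(counts.values(), reverse=True), wilds
-- ===== SOURCE B (Python) =====
-- def count_cards_wild(hand: str):
--     # Sort the hand, then scan runs of equal cards (two-pointer grouping);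
--     # a 'J' run sets wilds, every other run length is collected.
--     s = sorted(hand)
--     counts = []
--     wilds = 0
--     i = 0
--     n = len(s)
--     while i < n:
--         j = i
--         while j < n and s[j] == s[i]:
--             j += 1
--         if s[i] == 'J':
--             wilds = j - i
--         else:
--             counts.append(j - i)
--         i = j
--     if not counts:
--         return [0], wilds
--     return sorted(counts, reverse=True), wilds
-- ===== Notes on version B (the rewrite author's own statement) =====
-- stated objective: alternative
-- what changed: Replaces the dict-based frequency count with a sort-then-scan pass: the hand is sorted and equal-card runs are measured with two pointers, the J run giving wilds and the other run lengths giving the counts.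
import Mathlib
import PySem

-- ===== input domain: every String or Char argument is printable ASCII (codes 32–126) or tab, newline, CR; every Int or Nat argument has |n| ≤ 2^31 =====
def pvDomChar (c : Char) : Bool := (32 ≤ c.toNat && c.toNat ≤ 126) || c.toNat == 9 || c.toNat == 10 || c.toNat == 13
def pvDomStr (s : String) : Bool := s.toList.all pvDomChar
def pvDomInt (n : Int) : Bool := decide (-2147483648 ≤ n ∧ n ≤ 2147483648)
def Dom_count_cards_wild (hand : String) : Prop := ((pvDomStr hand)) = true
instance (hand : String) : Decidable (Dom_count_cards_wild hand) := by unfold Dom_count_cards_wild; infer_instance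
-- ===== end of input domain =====

-- B replaces A's dict-based frequency counting by a sort-then-scan over runs of equal cards (alternative algorithm, similar cost).

-- ===== PORT A =====
def count_cards_wild (hand : String) : List Int × Int :=
  let st := hand.toList.foldl
    (fun (s : Int × PySem.Dict Char Int) c =>
      if c == 'J' then (s.1 + 1, s.2)
      else (s.1, s.2.insert c (s.2.getD c 0 + 1)))
    (0, PySem.Dict.empty)
  if st.2.size = 0 then ([0], st.1)
  else (PySem.List.sorted st.2.values (fun x => x) true, st.1)

-- ===== PORT B =====
-- B's inner while loop finds the end of the current run of equal cards; it is ported as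
-- takeWhile/dropWhile structural recursion on the remaining (sorted) suffix.
def groupRuns : List Char → List (Char × Int)
  | [] => []
  | c :: rest =>
    (c, (1 : Int) + ((rest.takeWhile (· == c)).length : Int)) ::
      groupRuns (rest.dropWhile (· == c))
termination_by l => l.length
decreasing_by
  simp only [List.length_cons]
  exact Nat.lt_succ_of_le (List.length_dropWhile_le _ _)

def count_cards_wild_alt (hand : String) : List Int × Int :=
  let s := PySem.List.sorted hand.toList (fun c => c) false
  let st := (groupRuns s).foldl
    (fun (st : List Int × Int) (g : Char × Int) =>
      if g.1 == 'J' then (st.1, g.2) else (st.1 ++ [g.2], st.2))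
    ([], 0)
  if st.1 = [] then ([0], st.2)
  else (PySem.List.sorted st.1 (fun x => x) true, st.2)

-- ===== PRECONDITION & SPEC =====
def Spec_count_cards_wild (hand : String) (out : List Int × Int) : Prop := out = count_cards_wild_alt hand
instance (hand : String) (out : List Int × Int) : Decidable (Spec_count_cards_wild hand out) := by unfold Spec_count_cards_wild; infer_instance

-- ===== CLAIM (what is proved, stated in full; the proofs are below) =====
def Claim_equal_count_cards_wild : Prop := ∀ (hand : String), Dom_count_cards_wild hand → Spec_count_cards_wild hand (count_cards_wild hand)

-- ===== LEMMAS AND PROOFS =====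

-- A's counting loop splits into the wild count and the dict of non-J counts.
theorem foldA_split (l : List Char) (w : Int) (d : PySem.Dict Char Int) :
    l.foldl
      (fun (s : Int × PySem.Dict Char Int) c =>
        if c == 'J' then (s.1 + 1, s.2)
        else (s.1, s.2.insert c (s.2.getD c 0 + 1)))
      (w, d)
    = (w + (l.count 'J' : Int),
       (l.filter (fun c => !(c == 'J'))).foldl
         (fun d c => d.insert c (d.getD c 0 + 1)) d) := by
  induction l generalizing w d with
  | nil => simp
  | cons c rest ih =>
    rw [List.foldl_cons]
    by_cases h : c = 'J'
    · have e : (if (c == 'J') = true then (w + 1, d) else (w, d.insert c (d.getD c 0 + 1))) = (w + 1, d) := by simp [h]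
      rw [e, ih]
      have : (c :: rest).filter (fun c => !(c == 'J')) = rest.filter (fun c => !(c == 'J')) := by simp [h]
      rw [this]
      simp [h]
      ring
    · have e : (if (c == 'J') = true then (w + 1, d) else (w, d.insert c (d.getD c 0 + 1))) = (w, d.insert c (d.getD c 0 + 1)) := by simp [h]
      rw [e, ih]
      have : (c :: rest).filter (fun c => !(c == 'J')) = c :: rest.filter (fun c => !(c == 'J')) := by simp [h]
      rw [this, List.foldl_cons]
      simp [h]

-- B's group loop splits into the list of non-J run lengths and the wilds value.
theorem foldB_split (gs : List (Char × Int)) (cs : List Int) (w v : Int)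
    (hv : ∀ p ∈ gs, p.1 = 'J' → p.2 = v) :
    gs.foldl
      (fun (st : List Int × Int) (g : Char × Int) =>
        if g.1 == 'J' then (st.1, g.2) else (st.1 ++ [g.2], st.2))
      (cs, w)
    = (cs ++ (gs.filter (fun g => !(g.1 == 'J'))).map Prod.snd,
       if gs.any (fun g => g.1 == 'J') then v else w) := by
  induction gs generalizing cs w with
  | nil => simp
  | cons g rest ih =>
    rw [List.foldl_cons]
    by_cases h : g.1 = 'J'
    · have e : (if (g.1 == 'J') = true then (cs, g.2) else (cs ++ [g.2], w)) = (cs, g.2) := by simp [h]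
      rw [e, ih _ _ (fun p hp => hv p (by simp [hp]))]
      have hg : g.2 = v := hv g (by simp) h
      by_cases hr : rest.any (fun g => g.1 == 'J') = true <;> simp [h, hr, hg]
    · have e : (if (g.1 == 'J') = true then (cs, g.2) else (cs ++ [g.2], w)) = (cs ++ [g.2], w) := by simp [h]
      rw [e, ih _ _ (fun p hp => hv p (by simp [hp]))]
      simp [beq_iff_eq, h]
      simp only [beq_eq_false_iff_ne.mpr h, Bool.false_or]

-- sorted(xs, reverse=True) depends only on the multiset of an Int list.
theorem sorted_rev_eq_of_perm (xs ys : List Int) (h : xs.Perm ys) :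
    PySem.List.sorted xs (fun x => x) true = PySem.List.sorted ys (fun x => x) true := by
  have hp : (PySem.List.sorted xs (fun x => x) true).Perm (PySem.List.sorted ys (fun x => x) true) :=
    ((PySem.List.sorted_perm _ _ _).trans h).trans (PySem.List.sorted_perm _ _ _).symm
  exact List.Perm.eq_of_pairwise (fun a b _ _ hab hba => le_antisymm hba hab)
    (PySem.List.sorted_pairwise_rev xs (fun x => x)) (PySem.List.sorted_pairwise_rev ys (fun x => x)) hp

-- On a sorted list, groupRuns yields distinct keys, each paired with its count.
theorem groupRuns_spec : ∀ (l : List Char), l.Pairwise (· ≤ ·) →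
    ((groupRuns l).map Prod.fst).Nodup ∧
    (∀ p ∈ groupRuns l, p.2 = (l.count p.1 : Int)) ∧
    (∀ c, c ∈ (groupRuns l).map Prod.fst ↔ c ∈ l)
  | [], _ => by simp [groupRuns]
  | c :: rest, hs => by
    have hrest : rest.Pairwise (· ≤ ·) := (List.pairwise_cons.mp hs).2
    have hcle : ∀ x ∈ rest, c ≤ x := (List.pairwise_cons.mp hs).1
    have hd : (rest.dropWhile (· == c)).Pairwise (· ≤ ·) :=
      hrest.sublist (List.dropWhile_sublist _)
    have ih := groupRuns_spec (rest.dropWhile (· == c)) hd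
    obtain ⟨ihn, ihc, ihm⟩ := ih
    have ht : ∀ x ∈ rest.takeWhile (· == c), x = c := by
      intro x hx
      exact eq_of_beq (List.mem_takeWhile_imp (p := (· == c)) hx)
    have h2 : ∀ x ∈ rest.dropWhile (· == c), c < x := by
      intro x hx
      cases hd0 : rest.dropWhile (· == c) with
      | nil => rw [hd0] at hx; exact absurd hx (List.not_mem_nil)
      | cons h t2 =>
        have hh : (h == c) = false := by
          have hne0 : rest.dropWhile (· == c) ≠ [] := by rw [hd0]; simp
          have := List.head_dropWhile_not (· == c) hne0
          simp only [hd0, List.head_cons] at this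
          exact this
        have hhne : h ≠ c := by simpa using hh
        have hhr : h ∈ rest := (List.dropWhile_sublist _).mem (by rw [hd0]; simp)
        have hch : c < h := lt_of_le_of_ne (hcle h hhr) (Ne.symm hhne)
        rw [hd0] at hx
        rcases List.mem_cons.mp hx with rfl | hx2
        · exact hch
        · have : h ≤ x := by
            rw [hd0] at hd
            exact (List.pairwise_cons.mp hd).1 x hx2
          exact lt_of_lt_of_le hch this
    have hcnot : c ∉ rest.dropWhile (· == c) := fun hm => lt_irrefl c (h2 c hm)
    have hsplit : rest.takeWhile (· == c) ++ rest.dropWhile (· == c) = rest :=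
      List.takeWhile_append_dropWhile
    have hct : (rest.takeWhile (· == c)).count c = (rest.takeWhile (· == c)).length := by
      rw [List.count_eq_length]
      intro b hb; exact (ht b hb).symm ▸ rfl
    have hcd : (rest.dropWhile (· == c)).count c = 0 := List.count_eq_zero.mpr hcnot
    have hrc : rest.count c = (rest.takeWhile (· == c)).length := by
      conv_lhs => rw [← hsplit]
      rw [List.count_append, hct, hcd]
      omega
    have hcl : (c :: rest).count c = 1 + (rest.takeWhile (· == c)).length := by
      rw [List.count_cons_self, hrc]
      omega
    refine ⟨?_, ?_, ?_⟩
    · rw [groupRuns]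
      simp only [List.map_cons, List.nodup_cons]
      exact ⟨fun hm => hcnot ((ihm c).mp hm), ihn⟩
    · rw [groupRuns]
      intro p hp
      rcases List.mem_cons.mp hp with rfl | hp2
      · simp only [hcl]; push_cast; ring
      · have h1d : p.1 ∈ rest.dropWhile (· == c) := (ihm p.1).mp (List.mem_map_of_mem hp2)
        have hne : p.1 ≠ c := fun he => hcnot (he ▸ h1d)
        have hnt : (rest.takeWhile (· == c)).count p.1 = 0 :=
          List.count_eq_zero.mpr (fun hm => hne (ht _ hm))
        rw [ihc p hp2]
        congr 1
        have hrp : rest.count p.1 = (rest.dropWhile (· == c)).count p.1 := by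
          conv_lhs => rw [← hsplit]
          rw [List.count_append, hnt]
          omega
        rw [List.count_cons_of_ne (Ne.symm hne), hrp]
    · intro c'
      rw [groupRuns]
      simp only [List.map_cons, List.mem_cons, ihm]
      constructor
      · rintro (rfl | hm)
        · exact Or.inl rfl
        · exact Or.inr ((List.dropWhile_sublist _).mem hm)
      · rintro (rfl | hr)
        · exact Or.inl rfl
        · rw [← hsplit] at hr
          rcases List.mem_append.mp hr with hmt | hmd
          · exact Or.inl (ht _ hmt)
          · exact Or.inr hmd
termination_by l => l.length
decreasing_by
  have := List.length_dropWhile_le (fun x => x == c) rest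
  simp only [List.length_cons]
  omega

theorem ofList_eq_nil_iff (xs : List Char) : PySem.Set.ofList xs = [] ↔ xs = [] := by
  constructor
  · intro h
    by_contra hne
    cases xs with
    | nil => exact hne rfl
    | cons x t =>
      have : x ∈ PySem.Set.ofList (x :: t) := (PySem.Set.mem_ofList _ _).mpr (by simp)
      rw [h] at this
      exact List.not_mem_nil this
  · rintro rfl; rfl

-- The two programs return the same pair on every input.
theorem count_cards_wild_eq (hand : String) : count_cards_wild hand = count_cards_wild_alt hand := by
  unfold count_cards_wild count_cards_wild_alt
  simp only []
  set l := hand.toList with hl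
  set sl := PySem.List.sorted l (fun c => c) false with hsl
  set fl := l.filter (fun c => !(c == 'J')) with hfl
  have hslp : sl.Perm l := PySem.List.sorted_perm _ _ _
  have hsort : sl.Pairwise (· ≤ ·) := PySem.List.sorted_pairwise l (fun c => c)
  obtain ⟨hn, hc, hm⟩ := groupRuns_spec sl hsort
  set gs := groupRuns sl with hgs
  -- A's fold
  rw [foldA_split]
  set D := fl.foldl (fun d c => d.insert c (d.getD c 0 + 1)) (PySem.Dict.empty : PySem.Dict Char Int) with hD
  have hkeys : D.keys = PySem.Set.ofList fl := by
    rw [hD, PySem.Dict.keys_foldl_insert fl (fun d c => d.getD c 0 + 1) PySem.Dict.empty]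
    rw [PySem.Dict.keys_empty]
    rfl
  have hknd : D.keys.Nodup := by
    rw [hkeys]; exact PySem.Set.nodup_ofList fl
  have hgetD : ∀ k, D.getD k 0 = (fl.count k : Int) := by
    intro k
    rw [hD, PySem.Dict.getD_foldl_insert_add_one, PySem.Dict.getD_empty]
    ring
  have hvals : D.values = (PySem.Set.ofList fl).map (fun k => (fl.count k : Int)) := by
    rw [PySem.Dict.values_eq_map_keys D hknd 0, hkeys]
    exact List.map_congr_left (fun k _ => hgetD k)
  -- B's fold
  rw [foldB_split gs [] 0 (sl.count 'J' : Int)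
      (fun p hp hpj => by rw [hc p hp, hpj])]
  -- wilds agree
  have hwl : (sl.count 'J' : ℕ) = l.count 'J' := hslp.count_eq 'J'
  have hwilds : (if gs.any (fun g => g.1 == 'J') = true then ((sl.count 'J' : ℕ) : Int) else 0)
      = (0 : Int) + (l.count 'J' : Int) := by
    by_cases hany : gs.any (fun g => g.1 == 'J') = true
    · rw [if_pos hany, hwl]; ring
    · rw [if_neg hany]
      have hnoJ : 'J' ∉ sl := by
        intro hJ
        apply hany
        have := (hm 'J').mpr hJ
        rcases List.mem_map.mp this with ⟨p, hp, hpf⟩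
        exact List.any_eq_true.mpr ⟨p, hp, by simp [hpf]⟩
      have : l.count 'J' = 0 := by
        rw [← hwl]; exact List.count_eq_zero.mpr hnoJ
      rw [this]; ring
  -- counts lists are permutations
  set KB := (gs.map Prod.fst).filter (fun c => !(c == 'J')) with hKB
  have hBc : (gs.filter (fun g => !(g.1 == 'J'))).map Prod.snd
      = KB.map (fun c => (sl.count c : Int)) := by
    rw [hKB, List.filter_map, List.map_map]
    apply List.map_congr_left
    intro p hp
    exact hc p (List.mem_of_mem_filter hp)
  have hKBnd : KB.Nodup := hn.filter _
  have hmemKB : ∀ c, c ∈ KB ↔ c ∈ PySem.Set.ofList fl := by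
    intro c
    rw [PySem.Set.mem_ofList, hKB, List.mem_filter, hm c, hfl, List.mem_filter]
    constructor
    · rintro ⟨h1, h2⟩; exact ⟨hslp.mem_iff.mp h1, h2⟩
    · rintro ⟨h1, h2⟩; exact ⟨hslp.mem_iff.mpr h1, h2⟩
  have hperm : (KB.map (fun c => (sl.count c : Int))).Perm
      ((PySem.Set.ofList fl).map (fun k => (fl.count k : Int))) := by
    have hp : KB.Perm (PySem.Set.ofList fl) :=
      (List.perm_ext_iff_of_nodup hKBnd (PySem.Set.nodup_ofList fl)).mpr hmemKB
    have : KB.map (fun c => (sl.count c : Int)) = KB.map (fun k => (fl.count k : Int)) := by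
      apply List.map_congr_left
      intro k hk
      have hkfl : k ∈ fl := by
        have := (hmemKB k).mp hk
        exact (PySem.Set.mem_ofList _ _).mp this
      have hkne : (!(k == 'J')) = true := (List.mem_filter.mp hkfl).2
      have h1 : List.count k fl = List.count k l := by
        rw [hfl]
        exact List.count_filter (p := fun c => !(c == 'J')) hkne
      rw [h1, hslp.count_eq k]
    rw [this]
    exact hp.map _
  -- emptiness conditions coincide
  have hsz : D.size = D.keys.length := by simp [PySem.Dict.size, PySem.Dict.keys]
  have hsziff : (D.size = 0) ↔ fl = [] := by
    rw [hsz, hkeys, List.length_eq_zero_iff, ofList_eq_nil_iff]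
  have hKBnil : KB = [] ↔ fl = [] := by
    constructor
    · intro h
      rw [List.eq_nil_iff_forall_not_mem]
      intro c hcm
      have : c ∈ KB := (hmemKB c).mpr ((PySem.Set.mem_ofList fl c).mpr hcm)
      simp [h] at this
    · intro h
      rw [List.eq_nil_iff_forall_not_mem]
      intro c hcm
      have := (PySem.Set.mem_ofList fl c).mp ((hmemKB c).mp hcm)
      simp [h] at this
  have hcsiff : (KB.map (fun c => (sl.count c : Int)) = []) ↔ fl = [] := by
    rw [List.map_eq_nil_iff, hKBnil]
  -- finish
  simp only [hBc, hvals, hwilds, List.nil_append]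
  by_cases he : fl = []
  · rw [if_pos (hsziff.mpr he), if_pos (hcsiff.mpr he)]
  · rw [if_neg (fun h => he (hsziff.mp h)), if_neg (fun h => he (hcsiff.mp h))]
    have := sorted_rev_eq_of_perm _ _ hperm.symm
    rw [this]

-- ===== VERDICT (by name: the statement is the Claim_ definition above) =====
theorem count_cards_wild_spec : Claim_equal_count_cards_wild := by
  intro hand _
  exact count_cards_wild_eq hand
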